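-- pv_equiv track=rewrite | github.com/gudeqing/basefly | utils/rna_tools.py | merge_to_interval
-- ===== SOURCE A (Python) =====
-- def merge_to_interval(lst):
--     """根据是否连续将区间列表尽可能合并为更大的区间列表"""
--     init_lst = sorted(lst)
--     s = init_lst[0]
--     e = init_lst[0]
--     interval = []
--     for i in init_lst[1:]:
--         if e + 1 == i:
--             e += 1
--         else:
--             interval.append([s, e])
--             s, e = i, i
--     interval.append([s, e])
--     return interval
-- ===== SOURCE B (Python) =====
-- def merge_to_interval(lst):
--     """根据是否连续将区间列表尽可能合并为更大的区间列表"""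
--     xs = sorted(lst)
--     n = len(xs)
--     bounds = [0] + [i for i in range(1, n) if xs[i] != xs[i - 1] + 1] + [n]
--     return [[xs[a], xs[b - 1]] for a, b in zip(bounds, bounds[1:])]
-- ===== Notes on version B (the rewrite author's own statement) =====
-- stated objective: alternative
-- what changed: Replaces A's single stateful scan carrying (start, end, accumulator) with staged passes: a comprehension collects the break indices of the sorted list, and the intervals are built by mapping over zipped adjacent boundary pairs, with no carried loop state.
import Mathlib
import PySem

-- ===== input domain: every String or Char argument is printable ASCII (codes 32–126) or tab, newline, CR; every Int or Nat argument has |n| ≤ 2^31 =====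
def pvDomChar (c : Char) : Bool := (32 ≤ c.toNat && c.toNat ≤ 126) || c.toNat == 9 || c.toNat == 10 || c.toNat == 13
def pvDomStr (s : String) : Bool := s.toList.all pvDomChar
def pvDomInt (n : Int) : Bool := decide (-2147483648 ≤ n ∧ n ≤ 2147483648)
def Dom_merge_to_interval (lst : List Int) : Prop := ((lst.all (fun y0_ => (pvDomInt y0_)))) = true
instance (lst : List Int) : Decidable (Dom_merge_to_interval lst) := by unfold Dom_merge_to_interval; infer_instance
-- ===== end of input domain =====

-- B replaces A's single stateful scan (start/end/accumulator) by staged passes: a comprehension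
-- collects the break indices of the sorted list, and the intervals are built by zipping adjacent
-- boundaries; same asymptotic cost, no carried loop state.

-- ===== PORT A =====
-- step of the for-loop over init_lst[1:], state = (s, e, interval)
def mergeAStep (acc : Int × Int × List (List Int)) (i : Int) : Int × Int × List (List Int) :=
  if acc.2.1 + 1 = i then (acc.1, acc.2.1 + 1, acc.2.2)
  else (i, i, acc.2.2 ++ [[acc.1, acc.2.1]])

def merge_to_interval (lst : List Int) : List (List Int) :=
  match PySem.List.sorted lst (fun x => x) false with
  | [] => []  -- Python raises IndexError here (first-element read); excluded by Pre_
  | x :: rest =>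
      let r := rest.foldl mergeAStep (x, x, [])
      r.2.2 ++ [[r.1, r.2.1]]

-- ===== PORT B =====
-- '[i for i in range(1, n) if xs[i] != xs[i - 1] + 1]'; range(1, n) = List.range' 1 (n - 1);
-- all indices i, i-1 lie in [0, n), so xs[·] is ported as getD (exact on those inputs).
def bBreaks (xs : List Int) : List Nat :=
  (List.range' 1 (xs.length - 1)).filter (fun i => !(xs.getD i 0 == xs.getD (i - 1) 0 + 1))

-- '[[xs[a], xs[b - 1]] for a, b in zip(bounds, bounds[1:])]'; inside Pre_ every a and b - 1 is a
-- valid index (b ≥ 1), so getD is exact there; on the empty list Source B raises IndexError (outside Pre_).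
def merge_to_interval_alt (lst : List Int) : List (List Int) :=
  let xs := PySem.List.sorted lst (fun x => x) false
  let bounds := 0 :: bBreaks xs ++ [xs.length]
  (bounds.zip bounds.tail).map (fun p => [xs.getD p.1 0, xs.getD (p.2 - 1) 0])

-- ===== PRECONDITION & SPEC =====
-- A reads the first element of the sorted list and so raises IndexError on the empty list; Pre_ excludes exactly that input (B raises there too).
def Pre_merge_to_interval (lst : List Int) : Prop := lst ≠ []
instance (lst : List Int) : Decidable (Pre_merge_to_interval lst) := by unfold Pre_merge_to_interval; infer_instance
def pvWitness_merge_to_interval : List Int := [3, 1, 2, 7]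

def Spec_merge_to_interval (lst : List Int) (out : List (List Int)) : Prop := out = merge_to_interval_alt lst
instance (lst : List Int) (out : List (List Int)) : Decidable (Spec_merge_to_interval lst out) := by unfold Spec_merge_to_interval; infer_instance

-- ===== CLAIM (what is proved, stated in full; the proofs are below) =====
def Claim_equal_merge_to_interval : Prop := ∀ (lst : List Int), Dom_merge_to_interval lst → Pre_merge_to_interval lst → Spec_merge_to_interval lst (merge_to_interval lst)

-- ===== LEMMAS AND PROOFS =====

-- common description of the result: split off the maximal consecutive run
def lastRun (e : Int) (xs : List Int) : Int × List Int :=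
  match xs with
  | [] => (e, [])
  | y :: ys => if e + 1 = y then lastRun y ys else (e, y :: ys)

lemma lastRun_len (e : Int) (xs : List Int) : (lastRun e xs).2.length ≤ xs.length := by
  induction xs generalizing e with
  | nil => simp [lastRun]
  | cons y ys ih =>
      simp only [lastRun]
      split
      · exact le_trans (ih y) (Nat.le_succ _)
      · simp

def runsAux (xs : List Int) : List (List Int) :=
  match xs with
  | [] => []
  | x :: rest => [x, (lastRun x rest).1] :: runsAux (lastRun x rest).2
termination_by xs.length
decreasing_by have := lastRun_len x rest; simp; omega

-- A's fold equals the run decomposition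
lemma foldA_eq (rest : List Int) (s e : Int) (acc : List (List Int)) :
    (rest.foldl mergeAStep (s, e, acc)).2.2 ++ [[(rest.foldl mergeAStep (s, e, acc)).1, (rest.foldl mergeAStep (s, e, acc)).2.1]]
      = acc ++ ([s, (lastRun e rest).1] :: runsAux (lastRun e rest).2) := by
  induction rest generalizing s e acc with
  | nil => simp [lastRun, runsAux]
  | cons i r ih =>
      simp only [List.foldl_cons, mergeAStep, lastRun]
      by_cases h : e + 1 = i
      · simp only [h]
        have := ih s i acc
        simpa [h] using this
      · simp only [if_neg h]
        rw [ih]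
        simp [runsAux]

-- indexing through drop
lemma getD_drop (xs : List Int) (L j : Nat) : (xs.drop L).getD j 0 = xs.getD (L + j) 0 := by
  by_cases h : L + j < xs.length
  · have hj : j < (xs.drop L).length := by simp; omega
    rw [List.getD_eq_getElem _ _ hj, List.getD_eq_getElem _ _ h, List.getElem_drop]
  · rw [List.getD_eq_default _ _ (by simp; omega), List.getD_eq_default _ _ (by omega)]

-- facts about the maximal run: its suffix, its end value, consecutiveness inside, break after
lemma lastRun_facts (x : Int) (rest : List Int) :
    (lastRun x rest).2.length ≤ rest.length ∧
    (x :: rest).drop ((x :: rest).length - (lastRun x rest).2.length) = (lastRun x rest).2 ∧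
    (x :: rest).getD ((x :: rest).length - (lastRun x rest).2.length - 1) 0 = (lastRun x rest).1 ∧
    (∀ i, 1 ≤ i → i < (x :: rest).length - (lastRun x rest).2.length →
        (x :: rest).getD i 0 = (x :: rest).getD (i - 1) 0 + 1) ∧
    ((lastRun x rest).2 ≠ [] →
        (x :: rest).getD ((x :: rest).length - (lastRun x rest).2.length) 0
          ≠ (x :: rest).getD ((x :: rest).length - (lastRun x rest).2.length - 1) 0 + 1) := by
  induction rest generalizing x with
  | nil =>
      refine ⟨by simp [lastRun], by simp [lastRun], by simp [lastRun], ?_, by simp [lastRun]⟩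
      intro i h1 h2
      exfalso
      simp [lastRun] at h2
      omega
  | cons y ys ih =>
      by_cases h : x + 1 = y
      · have hlr : lastRun x (y :: ys) = lastRun y ys := by simp [lastRun, h]
        obtain ⟨h1, h2, h3, h4, h5⟩ := ih y
        have hlen : (lastRun y ys).2.length ≤ ys.length := h1
        -- L' for (y :: ys), L = L' + 1 for (x :: y :: ys)
        set t := (lastRun y ys).2 with ht
        have hL' : (y :: ys).length - t.length = ys.length + 1 - t.length := by simp
        have hL'pos : 1 ≤ (y :: ys).length - t.length := by simp; omega
        obtain ⟨k, hk⟩ : ∃ k, (y :: ys).length - t.length = k + 1 :=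
          ⟨(y :: ys).length - t.length - 1, by omega⟩
        have hLL : (x :: y :: ys).length - t.length = k + 2 := by simp at hk ⊢; omega
        rw [hlr]
        refine ⟨by simpa using Nat.le_succ_of_le h1, ?_, ?_, ?_, ?_⟩
        · rw [hLL, List.drop_succ_cons, ← hk]
          exact h2
        · rw [hLL, show k + 2 - 1 = k + 1 from rfl, List.getD_cons_succ]
          rw [hk, show k + 1 - 1 = k from rfl] at h3
          exact h3
        · intro i hi1 hiL
          rw [hLL] at hiL
          rcases Nat.lt_or_ge i 2 with hlt | hge
          · interval_cases i
            simp [h]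
          · obtain ⟨j, hj⟩ : ∃ j, i = j + 1 := ⟨i - 1, by omega⟩
            subst hj
            have := h4 j (by omega) (by omega)
            simp only [List.getD_cons_succ]
            obtain ⟨j', hj'⟩ : ∃ j', j = j' + 1 := ⟨j - 1, by omega⟩
            subst hj'
            simpa using this
        · intro hne
          have h5' := h5 hne
          rw [hk, show k + 1 - 1 = k from rfl] at h5'
          rw [hLL, show k + 2 - 1 = k + 1 from rfl, List.getD_cons_succ, List.getD_cons_succ]
          exact h5'
      · have hlr : lastRun x (y :: ys) = (x, y :: ys) := by simp [lastRun, h]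
        rw [hlr]
        have hL1 : (x :: y :: ys).length - (y :: ys).length = 1 := by simp
        refine ⟨le_refl _, by rw [hL1]; rfl, by rw [hL1]; rfl, ?_, ?_⟩
        · intro i h1 h2
          rw [hL1] at h2
          omega
        · intro _
          rw [hL1, show (1 : Nat) - 1 = 0 from rfl, List.getD_cons_succ,
            List.getD_cons_zero, List.getD_cons_zero]
          exact fun hc => h (by omega)

-- the break indices of x :: rest: none inside the first run, one at its end, then the
-- shifted break indices of the remaining suffix
lemma bBreaks_split (x : Int) (rest : List Int) :
    bBreaks (x :: rest)
      = if (lastRun x rest).2 = [] then []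
        else ((x :: rest).length - (lastRun x rest).2.length)
              :: ((bBreaks (lastRun x rest).2).map
                    (fun j => ((x :: rest).length - (lastRun x rest).2.length) + j)) := by
  obtain ⟨h1, h2, h3, h4, h5⟩ := lastRun_facts x rest
  set xs := x :: rest with hxs
  set t := (lastRun x rest).2 with ht
  set L := xs.length - t.length with hL
  have hLpos : 1 ≤ L := by simp [hL, hxs]; omega
  have hLle : L ≤ xs.length := by simp [hL]
  have hsplit : List.range' 1 (xs.length - 1) = List.range' 1 (L - 1) ++ List.range' L (xs.length - L) := by
    have := List.range'_append (s := 1) (m := L - 1) (n := xs.length - L) (step := 1)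
    rw [show 1 + 1 * (L - 1) = L by omega] at this
    rw [show xs.length - 1 = (L - 1) + (xs.length - L) by omega]
    exact this.symm
  have hfirst : (List.range' 1 (L - 1)).filter (fun i => !(xs.getD i 0 == xs.getD (i - 1) 0 + 1)) = [] := by
    rw [List.filter_eq_nil_iff]
    intro a ha
    rw [List.mem_range'_1] at ha
    have := h4 a ha.1 (by omega)
    rw [this]
    simp
  by_cases hte : t = []
  · have hLn : L = xs.length := by simp [hL, hte]
    rw [bBreaks, hsplit, List.filter_append, hfirst, if_pos hte]
    simp [hLn]
  · have htlen : 1 ≤ t.length := List.length_pos_iff.mpr hte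
    have hxlen : xs.length = L + t.length := by simp [hL, hxs]; omega
    have hrest : List.range' L (xs.length - L) = L :: List.range' (L + 1) (t.length - 1) := by
      rw [show xs.length - L = (t.length - 1) + 1 by omega, List.range'_succ]
    have hbreak : (fun i => !(xs.getD i 0 == xs.getD (i - 1) 0 + 1)) L = true := by
      have := h5 hte
      simpa using this
    have hshift : List.range' (L + 1) (t.length - 1)
        = (List.range' 1 (t.length - 1)).map (fun j => L + j) := by
      rw [List.map_add_range']
    have hgd : ∀ j : Nat, t.getD j 0 = xs.getD (L + j) 0 := by
      intro j; rw [← h2, getD_drop]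
    have hcong : ∀ j ∈ List.range' 1 (t.length - 1),
        ((fun i => !(xs.getD i 0 == xs.getD (i - 1) 0 + 1)) ∘ (fun j => L + j)) j
          = (fun i => !(t.getD i 0 == t.getD (i - 1) 0 + 1)) j := by
      intro j hj
      rw [List.mem_range'_1] at hj
      have hj1 : 1 ≤ j := hj.1
      simp only [Function.comp]
      rw [hgd j, show L + j - 1 = L + (j - 1) by omega, ← hgd (j - 1)]
    rw [bBreaks, hsplit, List.filter_append, hfirst, hrest, if_neg hte]
    rw [List.nil_append, List.filter_cons, if_pos hbreak]
    rw [hshift, List.filter_map, List.filter_congr hcong, bBreaks]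

-- every break index is ≥ 1
lemma bBreaks_pos (xs : List Int) : ∀ j ∈ bBreaks xs, 1 ≤ j := by
  intro j hj
  rw [bBreaks, List.mem_filter, List.mem_range'_1] at hj
  exact hj.1.1

-- B's staged construction equals the run decomposition
lemma bcore (fuel : Nat) (xs : List Int) (hf : xs.length ≤ fuel) (h : xs ≠ []) :
    ((0 :: bBreaks xs ++ [xs.length]).zip (bBreaks xs ++ [xs.length])).map
        (fun p => [xs.getD p.1 0, xs.getD (p.2 - 1) 0])
      = runsAux xs := by
  induction fuel generalizing xs with
  | zero =>
      cases xs with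
      | nil => exact absurd rfl h
      | cons a b => simp at hf
  | succ fuel ih =>
      cases xs with
      | nil => exact absurd rfl h
      | cons x rest =>
        obtain ⟨h1, h2, h3, h4, h5⟩ := lastRun_facts x rest
        set xs := x :: rest with hxs
        set e := (lastRun x rest).1 with he
        set t := (lastRun x rest).2 with ht
        set L := xs.length - t.length with hL
        have hLpos : 1 ≤ L := by simp [hL, hxs]; omega
        have hruns : runsAux xs = [x, e] :: runsAux t := by
          rw [hxs, runsAux]
        by_cases hte : t = []
        · have hLn : L = xs.length := by simp [hL, hte]
          rw [bBreaks_split, if_pos hte, hruns, hte, runsAux]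
          simp only [List.nil_append, List.singleton_append, List.zip_cons_cons,
            List.zip_nil_right, List.map_cons, List.map_nil]
          rw [show xs.length - 1 = L - 1 by omega, h3]
          simp [hxs]
        · have htlen : 1 ≤ t.length := List.length_pos_iff.mpr hte
          have hxlen : xs.length = L + t.length := by simp [hL, hxs]; omega
          rw [bBreaks_split, if_neg hte]
          set bt := bBreaks t with hbt
          -- peel the first pair (0, L)
          rw [show (0 :: (L :: bt.map (fun j => L + j)) ++ [xs.length]).zip
                ((L :: bt.map (fun j => L + j)) ++ [xs.length])
              = (0, L) :: ((L :: bt.map (fun j => L + j) ++ [xs.length]).zip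
                  (bt.map (fun j => L + j) ++ [xs.length])) by simp]
          rw [List.map_cons]
          have hhead : [xs.getD 0 0, xs.getD (L - 1) 0] = [x, e] := by
            rw [h3]; simp [hxs]
          -- the remaining pairs are the shifted pairs of t
          have hmap1 : L :: bt.map (fun j => L + j) ++ [xs.length]
              = (0 :: bt ++ [t.length]).map (fun j => L + j) := by
            simp [hxlen]
          have hmap2 : bt.map (fun j => L + j) ++ [xs.length]
              = (bt ++ [t.length]).map (fun j => L + j) := by
            simp [hxlen]
          rw [hmap1, hmap2, List.zip_map, List.map_map]
          have hcong : ∀ p ∈ (0 :: bt ++ [t.length]).zip (bt ++ [t.length]),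
              ((fun p : Nat × Nat => [xs.getD p.1 0, xs.getD (p.2 - 1) 0]) ∘ Prod.map (fun j => L + j) (fun j => L + j)) p
                = (fun p : Nat × Nat => [t.getD p.1 0, t.getD (p.2 - 1) 0]) p := by
            intro p hp
            obtain ⟨hp1, hp2⟩ := List.of_mem_zip (a := p.1) (b := p.2) (by simpa using hp)
            have hb1 : 1 ≤ p.2 := by
              rcases List.mem_append.mp hp2 with hmem | hmem
              · exact bBreaks_pos t p.2 hmem
              · simp at hmem; omega
            have hgd : ∀ j : Nat, t.getD j 0 = xs.getD (L + j) 0 := by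
              intro j; rw [← h2, getD_drop]
            simp only [Function.comp, Prod.map]
            rw [← hgd p.1, show L + p.2 - 1 = L + (p.2 - 1) by omega, ← hgd (p.2 - 1)]
          rw [List.map_congr_left hcong]
          have hIH := ih t (by simp [hxs] at hf; omega) hte
          rw [hIH, hruns, hhead]

-- ===== VERDICT (by name: the statement is the Claim_ definition above) =====
theorem merge_to_interval_spec : Claim_equal_merge_to_interval := by
  intro lst _ hpre
  unfold Spec_merge_to_interval merge_to_interval merge_to_interval_alt
  have hs : PySem.List.sorted lst (fun x => x) false ≠ [] := by
    rw [Ne, PySem.List.sorted_eq_nil_iff]; exact hpre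
  cases h : PySem.List.sorted lst (fun x => x) false with
  | nil => exact absurd h hs
  | cons x rest =>
      simp only []
      rw [foldA_eq, List.nil_append]
      have hb := bcore (x :: rest).length (x :: rest) (le_refl _) (by simp)
      rw [runsAux] at hb
      exact hb.symm
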